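-- pv_equiv track=rewrite | github.com/rmkenv/resist | resist.py | map_donor_interests_to_project2025
-- ===== SOURCE A (Python) =====
-- def map_donor_interests_to_project2025(donor_data):
--     """Map donor industries and interests to Project 2025 policy areas"""
--     # This would analyze donor information to determine which
--     # Project 2025 policy areas align with their interests
--
--     contributor = donor_data.get("contributor_name", "")
--     employer = donor_data.get("contributor_employer", "")
--
--     interests = []
--
--     # Simple keyword matching (would be more sophisticated in practice)
--     if any(word in contributor.lower() or word in employer.lower()
--            for word in ["oil", "gas", "coal", "energy", "petroleum"]):
--         interests.append("energy")
--
--     if any(word in contributor.lower() or word in employer.lower()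
--            for word in ["bank", "invest", "financ", "capital", "fund"]):
--         interests.append("economy")
--
--     if any(word in contributor.lower() or word in employer.lower()
--            for word in ["defense", "military", "security", "weapon"]):
--         interests.append("defense")
--
--     if any(word in contributor.lower() or word in employer.lower()
--            for word in ["health", "pharma", "medical", "hospital"]):
--         interests.append("healthcare")
--
--     if any(word in contributor.lower() or word in employer.lower()
--            for word in ["school", "education", "teacher", "university"]):
--         interests.append("education")
--
--     if any(word in contributor.lower() or word in employer.lower()
--            for word in ["immigration", "border", "patrol"]):
--         interests.append("immigration")
--
--     if any(word in contributor.lower() or word in employer.lower()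
--            for word in ["court", "judicial", "legal", "law", "attorney"]):
--         interests.append("judiciary")
--
--     if any(word in contributor.lower() or word in employer.lower()
--            for word in ["election", "vote", "ballot", "campaign"]):
--         interests.append("elections")
--
--     # If no specific interests found, mark as "general"
--     if not interests:
--         interests.append("general")
--
--     return interests
-- ===== SOURCE B (Python) =====
-- # B: inverted-index substring scan — instead of testing each keyword group with
-- # repeated `w in text` passes, enumerate every substring of the two (lowercased)
-- # fields whose length is a possible keyword length and look it up in a single
-- # keyword->tag hash map, collecting hit tags in a set; then emit the tags in the
-- # canonical order (or "general" if none matched).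
--
-- _TAG_ORDER = ["energy", "economy", "defense", "healthcare", "education",
--               "immigration", "judiciary", "elections"]
--
-- _KW = {
--     "oil": "energy", "gas": "energy", "coal": "energy", "energy": "energy",
--     "petroleum": "energy",
--     "bank": "economy", "invest": "economy", "financ": "economy",
--     "capital": "economy", "fund": "economy",
--     "defense": "defense", "military": "defense", "security": "defense",
--     "weapon": "defense",
--     "health": "healthcare", "pharma": "healthcare", "medical": "healthcare",
--     "hospital": "healthcare",
--     "school": "education", "education": "education", "teacher": "education",
--     "university": "education",
--     "immigration": "immigration", "border": "immigration", "patrol": "immigration",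
--     "court": "judiciary", "judicial": "judiciary", "legal": "judiciary",
--     "law": "judiciary", "attorney": "judiciary",
--     "election": "elections", "vote": "elections", "ballot": "elections",
--     "campaign": "elections",
-- }
--
-- def map_donor_interests_to_project2025(donor_data):
--     hit = set()
--     for field in ("contributor_name", "contributor_employer"):
--         text = donor_data.get(field, "").lower()
--         for i in range(len(text)):
--             for L in range(3, 12):  # keyword lengths are 3..11
--                 tag = _KW.get(text[i:i + L])
--                 if tag is not None:
--                     hit.add(tag)
--     interests = [t for t in _TAG_ORDER if t in hit]
--     return interests if interests else ["general"]
-- ===== Notes on version B (the rewrite author's own statement) =====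
-- stated objective: alternative
-- what changed: Inverts the search: instead of eight if-blocks each scanning the text for every keyword of a group, B enumerates each substring of plausible keyword length in the two lowercased fields, looks it up in one keyword->tag hash map, collects matched tags in a set, and finally emits them in the canonical tag order (or 'general').
import Mathlib
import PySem

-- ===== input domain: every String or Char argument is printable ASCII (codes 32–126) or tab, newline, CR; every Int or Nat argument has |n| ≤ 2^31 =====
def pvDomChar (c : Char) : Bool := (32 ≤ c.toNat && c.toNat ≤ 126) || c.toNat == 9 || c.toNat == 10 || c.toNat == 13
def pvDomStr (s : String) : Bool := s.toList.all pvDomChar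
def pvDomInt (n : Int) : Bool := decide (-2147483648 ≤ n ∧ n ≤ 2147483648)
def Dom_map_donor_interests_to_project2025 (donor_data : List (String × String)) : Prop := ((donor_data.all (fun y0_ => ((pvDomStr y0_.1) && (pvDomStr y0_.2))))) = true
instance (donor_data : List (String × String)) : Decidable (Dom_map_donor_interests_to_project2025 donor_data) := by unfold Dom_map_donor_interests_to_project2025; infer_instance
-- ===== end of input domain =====

-- B inverts the search: it enumerates each substring of plausible keyword length in the two
-- lowercased fields, looks it up in one keyword→tag map, collects hit tags in a set and emits
-- them in canonical tag order, instead of A's eight per-group containment if-blocks (objective: alternative).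

-- ===== PORT A =====
def map_donor_interests_to_project2025 (donor_data : List (String × String)) : List String :=
  let contributor := (PySem.Dict.mk donor_data).getD "contributor_name" ""
  let employer := (PySem.Dict.mk donor_data).getD "contributor_employer" ""
  let interests : List String := []
  let interests := if (["oil", "gas", "coal", "energy", "petroleum"].any
      (fun w => PySem.Str.isIn w (PySem.Str.lower contributor) || PySem.Str.isIn w (PySem.Str.lower employer)))
    then interests ++ ["energy"] else interests
  let interests := if (["bank", "invest", "financ", "capital", "fund"].any
      (fun w => PySem.Str.isIn w (PySem.Str.lower contributor) || PySem.Str.isIn w (PySem.Str.lower employer)))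
    then interests ++ ["economy"] else interests
  let interests := if (["defense", "military", "security", "weapon"].any
      (fun w => PySem.Str.isIn w (PySem.Str.lower contributor) || PySem.Str.isIn w (PySem.Str.lower employer)))
    then interests ++ ["defense"] else interests
  let interests := if (["health", "pharma", "medical", "hospital"].any
      (fun w => PySem.Str.isIn w (PySem.Str.lower contributor) || PySem.Str.isIn w (PySem.Str.lower employer)))
    then interests ++ ["healthcare"] else interests
  let interests := if (["school", "education", "teacher", "university"].any
      (fun w => PySem.Str.isIn w (PySem.Str.lower contributor) || PySem.Str.isIn w (PySem.Str.lower employer)))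
    then interests ++ ["education"] else interests
  let interests := if (["immigration", "border", "patrol"].any
      (fun w => PySem.Str.isIn w (PySem.Str.lower contributor) || PySem.Str.isIn w (PySem.Str.lower employer)))
    then interests ++ ["immigration"] else interests
  let interests := if (["court", "judicial", "legal", "law", "attorney"].any
      (fun w => PySem.Str.isIn w (PySem.Str.lower contributor) || PySem.Str.isIn w (PySem.Str.lower employer)))
    then interests ++ ["judiciary"] else interests
  let interests := if (["election", "vote", "ballot", "campaign"].any
      (fun w => PySem.Str.isIn w (PySem.Str.lower contributor) || PySem.Str.isIn w (PySem.Str.lower employer)))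
    then interests ++ ["elections"] else interests
  let interests := if interests.isEmpty then interests ++ ["general"] else interests
  interests

-- ===== PORT B =====
-- (strings are handled on the List Char side, PySem's exact representation of Python str)
def pvTagOrder : List String :=
  ["energy", "economy", "defense", "healthcare", "education", "immigration", "judiciary", "elections"]

def pvKwTable : List (List Char × String) :=
  [ ("oil".toList, "energy"), ("gas".toList, "energy"), ("coal".toList, "energy"),
    ("energy".toList, "energy"), ("petroleum".toList, "energy"),
    ("bank".toList, "economy"), ("invest".toList, "economy"), ("financ".toList, "economy"),
    ("capital".toList, "economy"), ("fund".toList, "economy"),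
    ("defense".toList, "defense"), ("military".toList, "defense"),
    ("security".toList, "defense"), ("weapon".toList, "defense"),
    ("health".toList, "healthcare"), ("pharma".toList, "healthcare"),
    ("medical".toList, "healthcare"), ("hospital".toList, "healthcare"),
    ("school".toList, "education"), ("education".toList, "education"),
    ("teacher".toList, "education"), ("university".toList, "education"),
    ("immigration".toList, "immigration"), ("border".toList, "immigration"),
    ("patrol".toList, "immigration"),
    ("court".toList, "judiciary"), ("judicial".toList, "judiciary"),
    ("legal".toList, "judiciary"), ("law".toList, "judiciary"),
    ("attorney".toList, "judiciary"),
    ("election".toList, "elections"), ("vote".toList, "elections"),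
    ("ballot".toList, "elections"), ("campaign".toList, "elections") ]

def pvKwDict : PySem.Dict (List Char) String := PySem.Dict.mk pvKwTable

def map_donor_interests_to_project2025_alt (donor_data : List (String × String)) : List String :=
  let hit : PySem.Set String :=
    ["contributor_name", "contributor_employer"].foldl (fun hit field =>
      let text := (PySem.Str.lower ((PySem.Dict.mk donor_data).getD field "")).toList
      (PySem.List.pyRange 0 (PySem.List.len text) 1).foldl (fun hit i =>
        (PySem.List.pyRange 3 12 1).foldl (fun hit L =>
          match pvKwDict.get? (PySem.List.slice text (some i) (some (i + L))) with
          | some tag => PySem.Set.add hit tag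
          | none => hit) hit) hit) PySem.Set.empty
  let interests := pvTagOrder.filter (fun t => PySem.Set.contains hit t)
  if interests.isEmpty then ["general"] else interests

-- ===== PRECONDITION & SPEC =====
def Spec_map_donor_interests_to_project2025 (donor_data : List (String × String)) (out : List String) : Prop := out = map_donor_interests_to_project2025_alt donor_data
instance (donor_data : List (String × String)) (out : List String) : Decidable (Spec_map_donor_interests_to_project2025 donor_data out) := by unfold Spec_map_donor_interests_to_project2025; infer_instance

-- ===== CLAIM (what is proved, stated in full; the proofs are below) =====
def Claim_equal_map_donor_interests_to_project2025 : Prop := ∀ (donor_data : List (String × String)), Dom_map_donor_interests_to_project2025 donor_data → Spec_map_donor_interests_to_project2025 donor_data (map_donor_interests_to_project2025 donor_data)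

-- ===== LEMMAS AND PROOFS =====

-- generic: membership after a fold whose step adds elements characterized by P
lemma pv_mem_foldl_iff {α : Type} (step : PySem.Set String → α → PySem.Set String)
    (P : α → String → Prop)
    (h : ∀ s a x, x ∈ step s a ↔ x ∈ s ∨ P a x) :
    ∀ (l : List α) (s : PySem.Set String) (x : String),
      x ∈ l.foldl step s ↔ x ∈ s ∨ ∃ a ∈ l, P a x := by
  intro l
  induction l with
  | nil => simp
  | cons a t ih =>
    intro s x
    simp only [List.foldl_cons, ih, h, List.mem_cons]
    constructor
    · rintro (⟨hx | hp⟩ | ⟨b, hb, hp⟩)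
      · exact Or.inl hx
      · exact Or.inr ⟨a, Or.inl rfl, hp⟩
      · exact Or.inr ⟨b, Or.inr hb, hp⟩
    · rintro (hx | ⟨b, (rfl | hb), hp⟩)
      · exact Or.inl (Or.inl hx)
      · exact Or.inl (Or.inr hp)
      · exact Or.inr ⟨b, hb, hp⟩

-- the substring scan of one text finds a word w (3 ≤ |w| ≤ 11) iff w is a substring
lemma pv_scan_iff (text w : List Char) (h3 : 3 ≤ w.length) (h11 : w.length < 12) :
    (∃ i ∈ PySem.List.pyRange 0 (PySem.List.len text) 1, ∃ L ∈ PySem.List.pyRange 3 12 1,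
        PySem.List.slice text (some i) (some (i + L)) = w)
      ↔ PySem.Chars.isIn w text = true := by
  constructor
  · rintro ⟨i, hi, L, hL, hslice⟩
    rw [PySem.List.mem_pyRange_one] at hi hL
    rw [PySem.List.slice_toNat text hi.1 (by omega)] at hslice
    rw [← PySem.Chars.exists_prefix_drop_iff_isIn]
    refine ⟨i.toNat, ?_⟩
    rw [← hslice]
    exact List.take_prefix _ _
  · intro hin
    obtain ⟨j, hj⟩ := (PySem.Chars.exists_prefix_drop_iff_isIn w text).2 hin
    have hjlt : j < text.length := by
      by_contra hge
      rw [List.drop_eq_nil_of_le (by omega)] at hj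
      have := List.IsPrefix.length_le hj
      simp only [List.length_nil] at this; omega
    refine ⟨(j : Int), ?_, (w.length : Int), ?_, ?_⟩
    · rw [PySem.List.mem_pyRange_one, PySem.List.len_eq]; omega
    · rw [PySem.List.mem_pyRange_one]; omega
    · rw [PySem.List.slice_toNat text (by omega) (by omega)]
      have : ((j : Int) + (w.length : Int)).toNat - ((j : Int)).toNat = w.length := by omega
      rw [this, Int.toNat_natCast]
      exact (List.prefix_iff_eq_take.1 hj).symm

-- dict lookup inversion: get? returns some tag iff the key is one of tag's keywords
lemma pv_get?_eq_some_iff (k : List Char) (tag : String) :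
    pvKwDict.get? k = some tag ↔ (k, tag) ∈ pvKwTable := by
  exact PySem.Dict.get?_eq_some_iff_mem_items pvKwDict k tag (by decide)

-- proof-side name for B's scanning fold (defeq to the fold inside the port)
def pvScan (sc se : List Char) : PySem.Set String :=
  [sc, se].foldl (fun hit text =>
    (PySem.List.pyRange 0 (PySem.List.len text) 1).foldl (fun hit i =>
      (PySem.List.pyRange 3 12 1).foldl (fun hit L =>
        match pvKwDict.get? (PySem.List.slice text (some i) (some (i + L))) with
        | some t => PySem.Set.add hit t
        | none => hit) hit) hit) PySem.Set.empty

-- membership in B's hit set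
lemma pv_mem_hit (sc se : List Char) (tag : String) :
    tag ∈ pvScan sc se
      ↔ ∃ p ∈ pvKwTable, p.2 = tag ∧
          (PySem.Chars.isIn p.1 sc = true ∨ PySem.Chars.isIn p.1 se = true) := by
  unfold pvScan
  have h1 : ∀ (hit : PySem.Set String) (key : List Char) (x : String),
      (x ∈ (match pvKwDict.get? key with
            | some t => PySem.Set.add hit t
            | none => hit)) ↔ x ∈ hit ∨ pvKwDict.get? key = some x := by
    intro hit key x
    cases h : pvKwDict.get? key with
    | none => simp
    | some t =>
      simp only [PySem.Set.mem_add]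
      constructor
      · rintro (hx | rfl)
        · exact Or.inl hx
        · exact Or.inr rfl
      · rintro (hx | ht)
        · exact Or.inl hx
        · exact Or.inr (Option.some.inj ht).symm
  have h2 : ∀ (text : List Char) (i : Int) (hit : PySem.Set String) (x : String),
      (x ∈ (PySem.List.pyRange 3 12 1).foldl (fun hit L =>
          match pvKwDict.get? (PySem.List.slice text (some i) (some (i + L))) with
          | some t => PySem.Set.add hit t
          | none => hit) hit)
        ↔ x ∈ hit ∨ ∃ L ∈ PySem.List.pyRange 3 12 1,
            pvKwDict.get? (PySem.List.slice text (some i) (some (i + L))) = some x :=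
    fun text i hit x => pv_mem_foldl_iff
      (fun hit L => match pvKwDict.get? (PySem.List.slice text (some i) (some (i + L))) with
            | some t => PySem.Set.add hit t
            | none => hit)
      (fun L x => pvKwDict.get? (PySem.List.slice text (some i) (some (i + L))) = some x)
      (fun s a y => h1 s _ y) _ hit x
  have h3 : ∀ (text : List Char) (hit : PySem.Set String) (x : String),
      (x ∈ (PySem.List.pyRange 0 (PySem.List.len text) 1).foldl (fun hit i =>
          (PySem.List.pyRange 3 12 1).foldl (fun hit L =>
            match pvKwDict.get? (PySem.List.slice text (some i) (some (i + L))) with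
            | some t => PySem.Set.add hit t
            | none => hit) hit) hit)
        ↔ x ∈ hit ∨ ∃ i ∈ PySem.List.pyRange 0 (PySem.List.len text) 1,
            ∃ L ∈ PySem.List.pyRange 3 12 1,
              pvKwDict.get? (PySem.List.slice text (some i) (some (i + L))) = some x :=
    fun text hit x => pv_mem_foldl_iff
      (fun hit i => (PySem.List.pyRange 3 12 1).foldl (fun hit L =>
          match pvKwDict.get? (PySem.List.slice text (some i) (some (i + L))) with
          | some t => PySem.Set.add hit t
          | none => hit) hit)
      (fun i x => ∃ L ∈ PySem.List.pyRange 3 12 1,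
          pvKwDict.get? (PySem.List.slice text (some i) (some (i + L))) = some x)
      (fun s a y => h2 text a s y) _ hit x
  have h4 := pv_mem_foldl_iff
      (fun hit text => (PySem.List.pyRange 0 (PySem.List.len text) 1).foldl (fun hit i =>
          (PySem.List.pyRange 3 12 1).foldl (fun hit L =>
            match pvKwDict.get? (PySem.List.slice text (some i) (some (i + L))) with
            | some t => PySem.Set.add hit t
            | none => hit) hit) hit)
      (fun text x => ∃ i ∈ PySem.List.pyRange 0 (PySem.List.len text) 1,
          ∃ L ∈ PySem.List.pyRange 3 12 1,
            pvKwDict.get? (PySem.List.slice text (some i) (some (i + L))) = some x)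
      (fun s a y => h3 a s y) [sc, se] PySem.Set.empty tag
  rw [h4]
  have hempty : tag ∉ (PySem.Set.empty : PySem.Set String) := by simp [PySem.Set.empty]
  have hw : ∀ p ∈ pvKwTable, 3 ≤ p.1.length ∧ p.1.length < 12 := by decide
  constructor
  · rintro (habs | ⟨text, htext, i, hi, L, hL, hget⟩)
    · exact absurd habs hempty
    have hmem : (PySem.List.slice text (some i) (some (i + L)), tag) ∈ pvKwTable :=
      (pv_get?_eq_some_iff _ _).1 hget
    have hb := hw _ hmem
    refine ⟨_, hmem, rfl, ?_⟩
    have hisin : PySem.Chars.isIn (PySem.List.slice text (some i) (some (i + L))) text = true :=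
      (pv_scan_iff text _ hb.1 hb.2).1 ⟨i, hi, L, hL, rfl⟩
    simp only [List.mem_cons, List.not_mem_nil, or_false] at htext
    rcases htext with rfl | rfl
    · exact Or.inl hisin
    · exact Or.inr hisin
  · rintro ⟨p, hp, htag, hin⟩
    have hb := hw _ hp
    have hkey : (p.1, tag) ∈ pvKwTable := by
      rw [← htag]; exact hp
    refine Or.inr ?_
    rcases hin with hin | hin
    · obtain ⟨i, hi, L, hL, hslice⟩ := (pv_scan_iff sc p.1 hb.1 hb.2).2 hin
      exact ⟨sc, by simp, i, hi, L, hL, by rw [hslice]; exact (pv_get?_eq_some_iff _ _).2 hkey⟩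
    · obtain ⟨i, hi, L, hL, hslice⟩ := (pv_scan_iff se p.1 hb.1 hb.2).2 hin
      exact ⟨se, by simp, i, hi, L, hL, by rw [hslice]; exact (pv_get?_eq_some_iff _ _).2 hkey⟩

-- Set.contains of the hit set, as a Bool over the keyword table
lemma pv_hit_contains (sc se : List Char) (tag : String) :
    PySem.Set.contains (pvScan sc se) tag
      = (pvKwTable.filter (fun p => p.2 == tag)).any
          (fun p => PySem.Chars.isIn p.1 sc || PySem.Chars.isIn p.1 se) := by
  rw [Bool.eq_iff_iff, PySem.Set.contains_iff, pv_mem_hit, List.any_eq_true]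
  constructor
  · rintro ⟨p, hp, htag, hin⟩
    refine ⟨p, List.mem_filter.2 ⟨hp, by simp [htag]⟩, ?_⟩
    rcases hin with h | h <;> simp [h]
  · rintro ⟨p, hp, hor⟩
    obtain ⟨hp', htag⟩ := List.mem_filter.1 hp
    exact ⟨p, hp', by simpa using htag, by simpa using hor⟩

-- evaluating the table filter for tag "energy"
lemma pv_g1 (c e : String) :
    (List.filter (fun p => p.2 == "energy") pvKwTable).any
      (fun p => PySem.Chars.isIn p.1 (PySem.Str.lower c).toList || PySem.Chars.isIn p.1 (PySem.Str.lower e).toList)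
    = ["oil", "gas", "coal", "energy", "petroleum"].any
      (fun w => PySem.Str.isIn w (PySem.Str.lower c) || PySem.Str.isIn w (PySem.Str.lower e)) := by
  simp [pvKwTable]

-- evaluating the table filter for tag "economy"
lemma pv_g2 (c e : String) :
    (List.filter (fun p => p.2 == "economy") pvKwTable).any
      (fun p => PySem.Chars.isIn p.1 (PySem.Str.lower c).toList || PySem.Chars.isIn p.1 (PySem.Str.lower e).toList)
    = ["bank", "invest", "financ", "capital", "fund"].any
      (fun w => PySem.Str.isIn w (PySem.Str.lower c) || PySem.Str.isIn w (PySem.Str.lower e)) := by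
  simp [pvKwTable]

-- evaluating the table filter for tag "defense"
lemma pv_g3 (c e : String) :
    (List.filter (fun p => p.2 == "defense") pvKwTable).any
      (fun p => PySem.Chars.isIn p.1 (PySem.Str.lower c).toList || PySem.Chars.isIn p.1 (PySem.Str.lower e).toList)
    = ["defense", "military", "security", "weapon"].any
      (fun w => PySem.Str.isIn w (PySem.Str.lower c) || PySem.Str.isIn w (PySem.Str.lower e)) := by
  simp [pvKwTable]

-- evaluating the table filter for tag "healthcare"
lemma pv_g4 (c e : String) :
    (List.filter (fun p => p.2 == "healthcare") pvKwTable).any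
      (fun p => PySem.Chars.isIn p.1 (PySem.Str.lower c).toList || PySem.Chars.isIn p.1 (PySem.Str.lower e).toList)
    = ["health", "pharma", "medical", "hospital"].any
      (fun w => PySem.Str.isIn w (PySem.Str.lower c) || PySem.Str.isIn w (PySem.Str.lower e)) := by
  simp [pvKwTable]

-- evaluating the table filter for tag "education"
lemma pv_g5 (c e : String) :
    (List.filter (fun p => p.2 == "education") pvKwTable).any
      (fun p => PySem.Chars.isIn p.1 (PySem.Str.lower c).toList || PySem.Chars.isIn p.1 (PySem.Str.lower e).toList)
    = ["school", "education", "teacher", "university"].any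
      (fun w => PySem.Str.isIn w (PySem.Str.lower c) || PySem.Str.isIn w (PySem.Str.lower e)) := by
  simp [pvKwTable]

-- evaluating the table filter for tag "immigration"
lemma pv_g6 (c e : String) :
    (List.filter (fun p => p.2 == "immigration") pvKwTable).any
      (fun p => PySem.Chars.isIn p.1 (PySem.Str.lower c).toList || PySem.Chars.isIn p.1 (PySem.Str.lower e).toList)
    = ["immigration", "border", "patrol"].any
      (fun w => PySem.Str.isIn w (PySem.Str.lower c) || PySem.Str.isIn w (PySem.Str.lower e)) := by
  simp [pvKwTable]

-- evaluating the table filter for tag "judiciary"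
lemma pv_g7 (c e : String) :
    (List.filter (fun p => p.2 == "judiciary") pvKwTable).any
      (fun p => PySem.Chars.isIn p.1 (PySem.Str.lower c).toList || PySem.Chars.isIn p.1 (PySem.Str.lower e).toList)
    = ["court", "judicial", "legal", "law", "attorney"].any
      (fun w => PySem.Str.isIn w (PySem.Str.lower c) || PySem.Str.isIn w (PySem.Str.lower e)) := by
  simp [pvKwTable]

-- evaluating the table filter for tag "elections"
lemma pv_g8 (c e : String) :
    (List.filter (fun p => p.2 == "elections") pvKwTable).any
      (fun p => PySem.Chars.isIn p.1 (PySem.Str.lower c).toList || PySem.Chars.isIn p.1 (PySem.Str.lower e).toList)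
    = ["election", "vote", "ballot", "campaign"].any
      (fun w => PySem.Str.isIn w (PySem.Str.lower c) || PySem.Str.isIn w (PySem.Str.lower e)) := by
  simp [pvKwTable]

-- ===== VERDICT (by name: the statement is the Claim_ definition above) =====
theorem map_donor_interests_to_project2025_spec : Claim_equal_map_donor_interests_to_project2025 := by
  intro donor_data _
  show map_donor_interests_to_project2025 donor_data = map_donor_interests_to_project2025_alt donor_data
  have halt : map_donor_interests_to_project2025_alt donor_data =
      (let interests := pvTagOrder.filter (fun t => PySem.Set.contains
        (pvScan (PySem.Str.lower ((PySem.Dict.mk donor_data).getD "contributor_name" "")).toList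
                (PySem.Str.lower ((PySem.Dict.mk donor_data).getD "contributor_employer" "")).toList) t)
       if interests.isEmpty then ["general"] else interests) := rfl
  rw [halt]
  simp only [pvTagOrder, List.filter_cons, List.filter_nil, pv_hit_contains,
    pv_g1, pv_g2, pv_g3, pv_g4, pv_g5, pv_g6, pv_g7, pv_g8]
  simp only [map_donor_interests_to_project2025]
  generalize (["oil", "gas", "coal", "energy", "petroleum"].any
      (fun w => PySem.Str.isIn w (PySem.Str.lower ((PySem.Dict.mk donor_data).getD "contributor_name" "")) || PySem.Str.isIn w (PySem.Str.lower ((PySem.Dict.mk donor_data).getD "contributor_employer" "")))) = b1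
  generalize (["bank", "invest", "financ", "capital", "fund"].any
      (fun w => PySem.Str.isIn w (PySem.Str.lower ((PySem.Dict.mk donor_data).getD "contributor_name" "")) || PySem.Str.isIn w (PySem.Str.lower ((PySem.Dict.mk donor_data).getD "contributor_employer" "")))) = b2
  generalize (["defense", "military", "security", "weapon"].any
      (fun w => PySem.Str.isIn w (PySem.Str.lower ((PySem.Dict.mk donor_data).getD "contributor_name" "")) || PySem.Str.isIn w (PySem.Str.lower ((PySem.Dict.mk donor_data).getD "contributor_employer" "")))) = b3
  generalize (["health", "pharma", "medical", "hospital"].any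
      (fun w => PySem.Str.isIn w (PySem.Str.lower ((PySem.Dict.mk donor_data).getD "contributor_name" "")) || PySem.Str.isIn w (PySem.Str.lower ((PySem.Dict.mk donor_data).getD "contributor_employer" "")))) = b4
  generalize (["school", "education", "teacher", "university"].any
      (fun w => PySem.Str.isIn w (PySem.Str.lower ((PySem.Dict.mk donor_data).getD "contributor_name" "")) || PySem.Str.isIn w (PySem.Str.lower ((PySem.Dict.mk donor_data).getD "contributor_employer" "")))) = b5
  generalize (["immigration", "border", "patrol"].any
      (fun w => PySem.Str.isIn w (PySem.Str.lower ((PySem.Dict.mk donor_data).getD "contributor_name" "")) || PySem.Str.isIn w (PySem.Str.lower ((PySem.Dict.mk donor_data).getD "contributor_employer" "")))) = b6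
  generalize (["court", "judicial", "legal", "law", "attorney"].any
      (fun w => PySem.Str.isIn w (PySem.Str.lower ((PySem.Dict.mk donor_data).getD "contributor_name" "")) || PySem.Str.isIn w (PySem.Str.lower ((PySem.Dict.mk donor_data).getD "contributor_employer" "")))) = b7
  generalize (["election", "vote", "ballot", "campaign"].any
      (fun w => PySem.Str.isIn w (PySem.Str.lower ((PySem.Dict.mk donor_data).getD "contributor_name" "")) || PySem.Str.isIn w (PySem.Str.lower ((PySem.Dict.mk donor_data).getD "contributor_employer" "")))) = b8
  revert b1 b2 b3 b4 b5 b6 b7 b8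
  decide
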